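-- pv_equiv track=rewrite | github.com/schwanncells/podcasts | scripts/format_discovery.py | format_discovery
-- ===== SOURCE A (Python) =====
-- from collections import defaultdict
--
-- SLACK_EMOJI = [
--     ":one:", ":two:", ":three:", ":four:", ":five:",
--     ":six:", ":seven:", ":eight:", ":nine:", ":keycap_ten:"
-- ]
--
-- def format_discovery(data: dict) -> str:
--     """Format discovery JSON into Slack message."""
--     episodes = data.get("episodes", [])
--     unsummarized = [e for e in episodes if not e.get("summary_exists", False)]
--
--     if not unsummarized:
--         return ":studio_microphone: *Podcast Discovery* — No new unsummarized episodes found."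
--
--     # Group by date (newest first)
--     by_date = defaultdict(list)
--     for ep in sorted(unsummarized, key=lambda e: e["published_at"], reverse=True):
--         date = ep["published_at"][:10]
--         by_date[date].append(ep)
--
--     # Build message
--     lines = [f":studio_microphone: *Podcast Discovery — {len(unsummarized)} new episode(s)*\n"]
--
--     episode_num = 1
--     for date in sorted(by_date.keys(), reverse=True):
--         lines.append(f"**{date}**")
--         for ep in by_date[date]:
--             emoji = SLACK_EMOJI[episode_num - 1] if episode_num <= 10 else f"{episode_num}."
--             transcript_emoji = ep.get("transcript_emoji", ":speaker:")
--             lines.append(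
--                 f"{emoji} **{ep['feed_title']}** — {ep['title']} {transcript_emoji}"
--             )
--             episode_num += 1
--
--     lines.append("\nWhich would you like to process? (numbers, ranges, or \"all\")")
--     return "\n".join(lines)
-- ===== SOURCE B (Python) =====
-- SLACK_EMOJI = [
--     ":one:", ":two:", ":three:", ":four:", ":five:",
--     ":six:", ":seven:", ":eight:", ":nine:", ":keycap_ten:"
-- ]
--
-- def format_discovery(data: dict) -> str:
--     """Format discovery JSON into Slack message (single pass, no grouping dict)."""
--     episodes = data.get("episodes", [])
--     unsummarized = [e for e in episodes if not e.get("summary_exists", False)]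
--
--     if not unsummarized:
--         return ":studio_microphone: *Podcast Discovery* — No new unsummarized episodes found."
--
--     lines = [f":studio_microphone: *Podcast Discovery — {len(unsummarized)} new episode(s)*\n"]
--     last_date = None
--     for num, ep in enumerate(sorted(unsummarized, key=lambda e: e["published_at"], reverse=True), 1):
--         date = ep["published_at"][:10]
--         if date != last_date:
--             lines.append(f"**{date}**")
--             last_date = date
--         emoji = SLACK_EMOJI[num - 1] if num <= 10 else f"{num}."
--         transcript_emoji = ep.get("transcript_emoji", ":speaker:")
--         lines.append(f"{emoji} **{ep['feed_title']}** — {ep['title']} {transcript_emoji}")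
--
--     lines.append("\nWhich would you like to process? (numbers, ranges, or \"all\")")
--     return "\n".join(lines)
-- ===== Notes on version B (the rewrite author's own statement) =====
-- stated objective: simpler
-- what changed: Replaces the defaultdict grouping plus a second sort over the date keys with a single pass over the one sorted episode list that emits a date header whenever the 10-char date prefix changes (a last_date variable), relying on the fact that date prefixes of a descending-sorted list are non-increasing.
import Mathlib
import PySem

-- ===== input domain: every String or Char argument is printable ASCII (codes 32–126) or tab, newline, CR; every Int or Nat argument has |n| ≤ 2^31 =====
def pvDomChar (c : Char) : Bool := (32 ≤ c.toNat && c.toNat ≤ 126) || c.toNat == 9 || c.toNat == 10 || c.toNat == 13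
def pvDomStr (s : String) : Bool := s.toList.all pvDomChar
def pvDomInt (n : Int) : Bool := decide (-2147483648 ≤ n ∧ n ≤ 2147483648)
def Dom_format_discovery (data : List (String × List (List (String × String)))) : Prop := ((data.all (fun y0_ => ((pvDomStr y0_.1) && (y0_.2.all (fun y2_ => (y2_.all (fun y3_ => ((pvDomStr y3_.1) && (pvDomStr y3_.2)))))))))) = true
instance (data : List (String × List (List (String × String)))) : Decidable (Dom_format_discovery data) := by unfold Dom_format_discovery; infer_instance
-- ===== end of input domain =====

-- B replaces A's defaultdict grouping + second sort over the date keys by one pass over the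
-- single sorted episode list that emits a date header whenever the date prefix changes (simpler).

-- shared literal constants and the f-string pieces both Pythons build verbatim
def pvSlackEmoji : List String :=
  [":one:", ":two:", ":three:", ":four:", ":five:",
   ":six:", ":seven:", ":eight:", ":nine:", ":keycap_ten:"]

-- 'not e.get("summary_exists", False)': absent → True; present string s → truthy iff s ≠ ""
def pvIsUnsummarized (e : List (String × String)) : Bool :=
  match (PySem.Dict.mk e).get? "summary_exists" with
  | none => true
  | some s => s == ""

-- e["published_at"]; total via getD — Pre_ guarantees the key is present where A evaluates it
def pvPub (e : List (String × String)) : String :=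
  (PySem.Dict.mk e).getD "published_at" ""

-- ep["published_at"][:10]
def pvDate (e : List (String × String)) : String :=
  PySem.Str.slice (pvPub e) none (some 10)

-- f"{emoji} **{ep['feed_title']}** — {ep['title']} {transcript_emoji}"
def pvLine (num : Int) (e : List (String × String)) : String :=
  (if num ≤ 10 then PySem.List.pyGetD pvSlackEmoji (num - 1) "" else PySem.Int.toStr num ++ ".")
  ++ " **" ++ (PySem.Dict.mk e).getD "feed_title" "" ++ "** — "
  ++ (PySem.Dict.mk e).getD "title" "" ++ " "
  ++ (PySem.Dict.mk e).getD "transcript_emoji" ":speaker:"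

def pvHeader (count : Int) : String :=
  ":studio_microphone: *Podcast Discovery — " ++ PySem.Int.toStr count ++ " new episode(s)*\n"

def pvNoneMsg : String :=
  ":studio_microphone: *Podcast Discovery* — No new unsummarized episodes found."

def pvFooter : String :=
  "\nWhich would you like to process? (numbers, ranges, or \"all\")"

-- ===== PORT A =====
def format_discovery (data : List (String × List (List (String × String)))) : String :=
  let episodes := (PySem.Dict.mk data).getD "episodes" []
  let unsummarized := episodes.filter pvIsUnsummarized
  if unsummarized = [] then pvNoneMsg
  else
    -- by_date = defaultdict(list); for ep in sorted(..., reverse=True): by_date[date].append(ep)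
    let by_date := (PySem.List.sorted unsummarized pvPub true).foldl
        (fun d ep => d.modify (pvDate ep) [] (fun g => g ++ [ep])) (PySem.Dict.mk [])
    let st := (PySem.List.sorted by_date.keys (fun k => k) true).foldl
        (fun (st : List String × Int) date =>
          List.foldl (fun (st : List String × Int) ep => (st.1 ++ [pvLine st.2 ep], st.2 + 1))
            (st.1 ++ ["**" ++ date ++ "**"], st.2)
            (by_date.getD date []))
        ([pvHeader (PySem.List.len unsummarized)], 1)
    PySem.Str.join "\n" (st.1 ++ [pvFooter])

-- ===== PORT B =====
def format_discovery_alt (data : List (String × List (List (String × String)))) : String :=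
  let episodes := (PySem.Dict.mk data).getD "episodes" []
  let unsummarized := episodes.filter pvIsUnsummarized
  if unsummarized = [] then pvNoneMsg
  else
    -- single pass: last_date + enumerate(..., 1)
    let st := (PySem.List.sorted unsummarized pvPub true).foldl
        (fun (st : List String × Option String × Int) ep =>
          let date := pvDate ep
          let st1 := if st.2.1 = some date then st
                     else (st.1 ++ ["**" ++ date ++ "**"], some date, st.2.2)
          (st1.1 ++ [pvLine st1.2.2 ep], st1.2.1, st1.2.2 + 1))
        ([pvHeader (PySem.List.len unsummarized)], none, 1)
    PySem.Str.join "\n" (st.1 ++ [pvFooter])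

-- ===== PRECONDITION & SPEC =====
-- A raises KeyError when an unsummarized episode lacks "published_at", "feed_title" or "title";
-- exactly those inputs are excluded.
def Pre_format_discovery (data : List (String × List (List (String × String)))) : Prop :=
  ∀ e ∈ (PySem.Dict.mk data).getD "episodes" [], pvIsUnsummarized e = true →
    ((PySem.Dict.mk e).contains "published_at" = true ∧
     (PySem.Dict.mk e).contains "feed_title" = true ∧
     (PySem.Dict.mk e).contains "title" = true)
instance (data : List (String × List (List (String × String)))) : Decidable (Pre_format_discovery data) := by unfold Pre_format_discovery; infer_instance

def pvWitness_format_discovery : (List (String × List (List (String × String)))) :=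
  [("episodes",
    [[("published_at", "2024-01-02T10:00"), ("feed_title", "Feed"), ("title", "Ep")],
     [("published_at", "2023-12-31T09:00"), ("feed_title", "Feed"), ("title", "Old"), ("summary_exists", "yes")]])]

def Spec_format_discovery (data : List (String × List (List (String × String)))) (out : String) : Prop := out = format_discovery_alt data
instance (data : List (String × List (List (String × String)))) (out : String) : Decidable (Spec_format_discovery data out) := by unfold Spec_format_discovery; infer_instance

-- ===== CLAIM (what is proved, stated in full; the proofs are below) =====
def Claim_equal_format_discovery : Prop := ∀ (data : List (String × List (List (String × String)))), Dom_format_discovery data → Pre_format_discovery data → Spec_format_discovery data (format_discovery data)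

-- ===== LEMMAS AND PROOFS =====

-- lexicographic order on List Char is monotone under take
theorem pvLexTake (n : Nat) : ∀ {l₁ l₂ : List Char}, List.Lex (· < ·) l₁ l₂ → l₁.take n ≤ l₂.take n := by
  intro l₁ l₂ h
  induction h generalizing n with
  | nil =>
    cases n with
    | zero => exact le_refl _
    | succ n => exact le_of_lt (List.Lex.nil)
  | rel h =>
    cases n with
    | zero => exact le_refl _
    | succ n => exact le_of_lt (List.Lex.rel h)
  | cons h ih =>
    cases n with
    | zero => exact le_refl _
    | succ n =>
      rcases (ih (n := n)).lt_or_eq with h' | h'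
      · exact le_of_lt (List.Lex.cons h')
      · simp only [List.take_succ_cons, h']
        exact le_refl _

theorem pvTakeLe (n : Nat) (l₁ l₂ : List Char) (h : l₁ ≤ l₂) : l₁.take n ≤ l₂.take n := by
  rcases h.lt_or_eq with h | rfl
  · exact pvLexTake n h
  · exact le_refl _

-- s ≤ t → s[:10] ≤ t[:10]
theorem pvDateLe (a b : List (String × String)) (h : pvPub b ≤ pvPub a) : pvDate b ≤ pvDate a := by
  unfold pvDate
  rw [String.le_iff_toList_le] at h ⊢
  simp only [PySem.Str.toList_slice, PySem.Chars.slice_eq_listSlice,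
    PySem.List.slice_to _ (by norm_num : (0:Int) ≤ 10)]
  exact pvTakeLe _ _ _ h

theorem pvOfListSublist (xs : List String) : List.Sublist (PySem.Set.ofList xs) xs := by
  induction xs with
  | nil => simp [PySem.Set.ofList_nil]
  | cons x t ih =>
    rw [PySem.Set.ofList_cons]
    exact List.Sublist.cons₂ x (List.Sublist.trans List.filter_sublist ih)

-- dedup of a non-increasing list is strictly decreasing
theorem pvDedupPairwiseLt (l : List String) (h : l.Pairwise (fun a b => b ≤ a)) :
    (PySem.List.dedup l).Pairwise (fun a b => b < a) := by
  have hs : List.Sublist (PySem.List.dedup l) l := by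
    rw [PySem.List.dedup_eq_ofList]; exact pvOfListSublist l
  have h1 := h.sublist hs
  have h2 : (PySem.List.dedup l).Nodup := PySem.List.nodup_dedup l
  exact (h1.and h2).imp (fun {a b} ⟨hle, hne⟩ => lt_of_le_of_ne hle (Ne.symm hne))

theorem pvOfListConst (l : List String) (d : String) (hne : l ≠ []) (h : ∀ x ∈ l, x = d) :
    PySem.Set.ofList l = [d] := by
  cases l with
  | nil => exact absurd rfl hne
  | cons x t =>
    have hx : x = d := h x (by simp)
    rw [PySem.Set.ofList_cons, hx]
    have hd : (PySem.Set.ofList t).discard d = [] := by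
      show List.filter _ _ = []
      rw [List.filter_eq_nil_iff]
      intro y hy
      have hyd : y = d := h y (by simp [(PySem.Set.mem_ofList _ _).mp hy])
      simp [hyd]
    rw [hd]

-- dedup of (a constant block ++ a tail avoiding that constant)
theorem pvDedupSplit (l₁ l₂ : List String) (d : String)
    (h₁ : ∀ x ∈ l₁, x = d) (hne : l₁ ≠ []) (h₂ : ∀ x ∈ l₂, x ≠ d) :
    PySem.List.dedup (l₁ ++ l₂) = d :: PySem.List.dedup l₂ := by
  rw [PySem.List.dedup_eq_ofList, PySem.List.dedup_eq_ofList, PySem.Set.ofList_append,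
      pvOfListConst l₁ d hne h₁, PySem.Set.update_eq_append_filter]
  have : ∀ y ∈ PySem.Set.ofList l₂, (!(PySem.Set.contains ([d] : PySem.Set String) y)) = true := by
    intro y hy
    have : y ∈ l₂ := (PySem.Set.mem_ofList _ _).mp hy
    simp [PySem.Set.contains_eq_listContains, h₂ y this]
  rw [List.filter_eq_self.mpr this]
  rfl

-- B's pass over a run of equal dates with last_date already set: no header, just numbering
theorem genRunFold {α : Type} (date : α → String) (line : Int → α → String)
    (l : List α) (d : String) (hall : ∀ e ∈ l, date e = d) (acc : List String) (n : Int) :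
    l.foldl
      (fun (st : List String × Option String × Int) ep =>
        let dt := date ep
        let st1 := if st.2.1 = some dt then st
                   else (st.1 ++ ["**" ++ dt ++ "**"], some dt, st.2.2)
        (st1.1 ++ [line st1.2.2 ep], st1.2.1, st1.2.2 + 1))
      (acc, some d, n)
    = ((l.foldl (fun (st : List String × Int) ep => (st.1 ++ [line st.2 ep], st.2 + 1)) (acc, n)).1,
       some d,
       (l.foldl (fun (st : List String × Int) ep => (st.1 ++ [line st.2 ep], st.2 + 1)) (acc, n)).2) := by
  induction l generalizing acc n with
  | nil => rfl
  | cons e t ih =>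
    have hd : date e = d := hall e (by simp)
    simp only [List.foldl_cons, hd]
    exact ih (fun e he => hall e (by simp [he])) _ _

-- the core: A's grouped double loop equals B's single pass, on date-descending input
theorem genCore {α : Type} (date : α → String) (line : Int → α → String) :
    ∀ (N : Nat) (ys : List α), ys.length ≤ N →
    ys.Pairwise (fun a b => date b ≤ date a) →
    ∀ (last : Option String), (∀ e ∈ ys, last ≠ some (date e)) →
    ∀ (acc : List String) (n : Int),
    List.foldl
      (fun (st : List String × Int) dt =>
        List.foldl (fun (st : List String × Int) ep => (st.1 ++ [line st.2 ep], st.2 + 1))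
          (st.1 ++ ["**" ++ dt ++ "**"], st.2)
          (ys.filter (fun e => date e == dt)))
      (acc, n) (PySem.List.dedup (ys.map date))
    = ((ys.foldl
         (fun (st : List String × Option String × Int) ep =>
           let dt := date ep
           let st1 := if st.2.1 = some dt then st
                      else (st.1 ++ ["**" ++ dt ++ "**"], some dt, st.2.2)
           (st1.1 ++ [line st1.2.2 ep], st1.2.1, st1.2.2 + 1))
         (acc, last, n)).1,
       (ys.foldl
         (fun (st : List String × Option String × Int) ep =>
           let dt := date ep
           let st1 := if st.2.1 = some dt then st
                      else (st.1 ++ ["**" ++ dt ++ "**"], some dt, st.2.2)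
           (st1.1 ++ [line st1.2.2 ep], st1.2.1, st1.2.2 + 1))
         (acc, last, n)).2.2) := by
  intro N
  induction N with
  | zero =>
    intro ys hlen _ last _ acc n
    have : ys = [] := List.eq_nil_of_length_eq_zero (Nat.le_zero.mp hlen)
    subst this; rfl
  | succ N ih =>
    intro ys hlen hpw last hlast acc n
    cases ys with
    | nil => rfl
    | cons e t =>
      set p : α → Bool := fun x => date x == date e with hp
      have hpe : p e = true := by simp [hp]
      set run : List α := e :: t.takeWhile p with hrun
      set rest : List α := t.dropWhile p with hrest
      have hsplit : e :: t = run ++ rest := by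
        simp [hrun, hrest, List.takeWhile_append_dropWhile]
      -- every element of run has date (date e)
      have hrund : ∀ x ∈ run, date x = date e := by
        intro x hx
        rw [hrun, List.mem_cons] at hx
        rcases hx with rfl | hx
        · rfl
        · have := List.mem_takeWhile_imp hx
          simpa [hp] using this
      -- every element of rest has date < date e
      have hrestlt : ∀ x ∈ rest, date x < date e := by
        rw [hsplit] at hpw
        rw [List.pairwise_append] at hpw
        obtain ⟨pwrun, pwrest, hcross⟩ := hpw
        have hle : ∀ b ∈ rest, date b ≤ date e := fun b hb =>
          hcross e (by rw [hrun]; exact List.mem_cons_self) b hb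
        intro x hx
        obtain ⟨h, r', hr⟩ := List.exists_cons_of_ne_nil (List.ne_nil_of_mem hx)
        have hhne : date h ≠ date e := by
          have hh := List.head?_dropWhile_not p t
          rw [← hrest, hr] at hh
          simp only [List.head?_cons, hp] at hh
          simpa using hh
        have hhlt : date h < date e :=
          lt_of_le_of_ne (hle h (by rw [hr]; simp)) hhne
        rw [hr, List.mem_cons] at hx
        rcases hx with rfl | hx
        · exact hhlt
        · have : date x ≤ date h := by
            rw [hr] at pwrest
            exact (List.pairwise_cons.mp pwrest).1 x hx
          exact lt_of_le_of_lt this hhlt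
      have hrestd : ∀ x ∈ rest, date x ≠ date e := fun x hx => ne_of_lt (hrestlt x hx)
      -- dedup splits
      have hmap : (e :: t).map date = run.map date ++ rest.map date := by
        rw [hsplit, List.map_append]
      have hdedup : PySem.List.dedup ((e :: t).map date)
          = date e :: PySem.List.dedup (rest.map date) := by
        rw [hmap]
        apply pvDedupSplit
        · intro x hx; rcases List.mem_map.mp hx with ⟨y, hy, rfl⟩; exact hrund y hy
        · simp [hrun]
        · intro x hx; rcases List.mem_map.mp hx with ⟨y, hy, rfl⟩; exact hrestd y hy
      -- filters
      have hfilter1 : (e :: t).filter (fun x => date x == date e) = run := by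
        rw [hsplit, List.filter_append]
        rw [List.filter_eq_self.mpr (by intro x hx; simpa [hp] using hrund x hx),
            List.filter_eq_nil_iff.mpr (by intro x hx; simpa [hp] using hrestd x hx)]
        simp
      have hfilter2 : ∀ dt, dt ≠ date e →
          (e :: t).filter (fun x => date x == dt) = rest.filter (fun x => date x == dt) := by
        intro dt hdt
        rw [hsplit, List.filter_append, List.filter_eq_nil_iff.mpr
          (by intro x hx; simp [hrund x hx]; exact fun h => hdt h.symm), List.nil_append]
      -- abbreviations
      have hlaste : last ≠ some (date e) := hlast e List.mem_cons_self
      have hallrun : ∀ x ∈ t.takeWhile p, date x = date e := by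
        intro x hx; simpa [hp] using List.mem_takeWhile_imp hx
      -- B over the run
      have hBrun : run.foldl
            (fun (st : List String × Option String × Int) ep =>
              let dt := date ep
              let st1 := if st.2.1 = some dt then st
                         else (st.1 ++ ["**" ++ dt ++ "**"], some dt, st.2.2)
              (st1.1 ++ [line st1.2.2 ep], st1.2.1, st1.2.2 + 1))
            (acc, last, n)
          = ((run.foldl (fun (st : List String × Int) ep => (st.1 ++ [line st.2 ep], st.2 + 1))
                (acc ++ ["**" ++ date e ++ "**"], n)).1,
             some (date e),
             (run.foldl (fun (st : List String × Int) ep => (st.1 ++ [line st.2 ep], st.2 + 1))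
                (acc ++ ["**" ++ date e ++ "**"], n)).2) := by
        rw [hrun]
        simp only [List.foldl_cons]
        rw [if_neg (by simpa using hlaste)]
        exact genRunFold date line _ _ hallrun _ _
      -- the run-inner result, as init for the remaining dates
      have hrest_pw : rest.Pairwise (fun a b => date b ≤ date a) :=
        hpw.sublist (by rw [hrest]; exact (List.dropWhile_sublist p).trans (List.sublist_cons_self e t))
      have hrest_len : rest.length ≤ N := by
        rw [hrest]
        exact le_trans (List.length_dropWhile_le p t) (by simpa using hlen)
      have hrest_last : ∀ x ∈ rest, (some (date e) : Option String) ≠ some (date x) := by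
        intro x hx
        simpa using (ne_of_lt (hrestlt x hx)).symm
      have hcong : List.foldl
            (fun (st : List String × Int) dt =>
              List.foldl (fun (st : List String × Int) ep => (st.1 ++ [line st.2 ep], st.2 + 1))
                (st.1 ++ ["**" ++ dt ++ "**"], st.2)
                ((e :: t).filter (fun x => date x == dt)))
            (run.foldl (fun (st : List String × Int) ep => (st.1 ++ [line st.2 ep], st.2 + 1))
                (acc ++ ["**" ++ date e ++ "**"], n))
            (PySem.List.dedup (rest.map date))
          = List.foldl
            (fun (st : List String × Int) dt =>
              List.foldl (fun (st : List String × Int) ep => (st.1 ++ [line st.2 ep], st.2 + 1))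
                (st.1 ++ ["**" ++ dt ++ "**"], st.2)
                (rest.filter (fun x => date x == dt)))
            (run.foldl (fun (st : List String × Int) ep => (st.1 ++ [line st.2 ep], st.2 + 1))
                (acc ++ ["**" ++ date e ++ "**"], n))
            (PySem.List.dedup (rest.map date)) := by
        apply PySem.List.foldl_congr_mem
        intro st dt hdt
        have : dt ≠ date e := by
          have := (PySem.List.mem_dedup _ _).mp hdt
          rcases List.mem_map.mp this with ⟨y, hy, rfl⟩
          exact ne_of_lt (hrestlt y hy)
        rw [hfilter2 dt this]
      have hih := ih rest hrest_len hrest_pw (some (date e)) hrest_last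
        (run.foldl (fun (st : List String × Int) ep => (st.1 ++ [line st.2 ep], st.2 + 1))
            (acc ++ ["**" ++ date e ++ "**"], n)).1
        (run.foldl (fun (st : List String × Int) ep => (st.1 ++ [line st.2 ep], st.2 + 1))
            (acc ++ ["**" ++ date e ++ "**"], n)).2
      -- assemble
      calc List.foldl
            (fun (st : List String × Int) dt =>
              List.foldl (fun (st : List String × Int) ep => (st.1 ++ [line st.2 ep], st.2 + 1))
                (st.1 ++ ["**" ++ dt ++ "**"], st.2)
                ((e :: t).filter (fun x => date x == dt)))
            (acc, n) (PySem.List.dedup ((e :: t).map date))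
          = List.foldl
            (fun (st : List String × Int) dt =>
              List.foldl (fun (st : List String × Int) ep => (st.1 ++ [line st.2 ep], st.2 + 1))
                (st.1 ++ ["**" ++ dt ++ "**"], st.2)
                (rest.filter (fun x => date x == dt)))
            (run.foldl (fun (st : List String × Int) ep => (st.1 ++ [line st.2 ep], st.2 + 1))
                (acc ++ ["**" ++ date e ++ "**"], n))
            (PySem.List.dedup (rest.map date)) := by
            rw [hdedup]
            simp only [List.foldl_cons]
            rw [hfilter1]
            exact hcong
        _ = _ := by
            rw [hih]
            conv_rhs => rw [hsplit, List.foldl_append, hBrun]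

-- ===== VERDICT (by name: the statement is the Claim_ definition above) =====
theorem format_discovery_spec : Claim_equal_format_discovery := by
  unfold Claim_equal_format_discovery
  intro data _ _
  unfold Spec_format_discovery format_discovery format_discovery_alt
  by_cases h : ((PySem.Dict.mk data).getD "episodes" []).filter pvIsUnsummarized = []
  · simp [h]
  · simp only [if_neg h]
    set ys := PySem.List.sorted (((PySem.Dict.mk data).getD "episodes" []).filter pvIsUnsummarized) pvPub true with hys
    have hpw : ys.Pairwise (fun a b => pvPub b ≤ pvPub a) := PySem.List.sorted_pairwise_rev _ _
    have hd : ys.Pairwise (fun a b => pvDate b ≤ pvDate a) := hpw.imp (fun {a b} hab => pvDateLe a b hab)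
    have h1 : (ys.foldl (fun d ep => d.modify (pvDate ep) [] (fun g => g ++ [ep]))
        (PySem.Dict.mk ([] : List (String × List (List (String × String)))))).keys
        = PySem.List.dedup (ys.map pvDate) := by
      have hk := PySem.Dict.keys_foldl_modify_key ys pvDate ([] : List (List (String × String)))
        (fun _ ep => (fun g => g ++ [ep])) (PySem.Dict.mk [])
      rw [PySem.List.dedup_eq_ofList]
      simpa using hk
    have h2 : PySem.List.sorted (PySem.List.dedup (ys.map pvDate)) (fun k => k) true
        = PySem.List.dedup (ys.map pvDate) := by
      apply PySem.List.sorted_rev_eq_of_perm_of_pairwise_gt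
      · exact List.Perm.refl _
      · exact pvDedupPairwiseLt _ ((List.pairwise_map).mpr hd)
    have h3 : ∀ dt, (ys.foldl (fun d ep => d.modify (pvDate ep) [] (fun g => g ++ [ep]))
        (PySem.Dict.mk ([] : List (String × List (List (String × String)))))).getD dt []
        = ys.filter (fun e => pvDate e == dt) := by
      intro dt
      have hg := PySem.Dict.getD_foldl_modify_append (ys.map (fun e => (pvDate e, e)))
        (PySem.Dict.mk ([] : List (String × List (List (String × String))))) dt
      rw [List.foldl_map] at hg
      simpa [List.filter_map, List.map_map, Function.comp_def] using hg
    simp only [h1, h2, h3]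
    have hcore := genCore pvDate pvLine ys.length ys le_rfl hd none (by simp)
      [pvHeader (PySem.List.len (((PySem.Dict.mk data).getD "episodes" []).filter pvIsUnsummarized))] 1
    rw [hcore]
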